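-- pv_equiv track=rewrite | github.com/yacai0412/LILAP_caiya | SNP/same_reads_phasing.py | if_linkage_snp_1_2
-- ===== SOURCE A (Python) =====
-- def if_linkage_snp_1_2(snp_pos1_cover_reads_dic, snp_pos1_support_reads_dic, snp_pos2_cover_reads_dic, snp_pos2_support_reads_dic):
--     c = 0
--     cover_reads_dic = {}
--     for read1 in snp_pos1_cover_reads_dic:
--         if read1 in snp_pos2_cover_reads_dic:
--             cover_reads_dic[read1] = 1
--
--     if len(cover_reads_dic) == 0:
--         c += 1
--     else:
--         for read2 in cover_reads_dic:
--             if (read2 in snp_pos1_support_reads_dic and read2 not in snp_pos2_support_reads_dic) or (read2 not in snp_pos1_support_reads_dic and read2 in snp_pos2_support_reads_dic):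
--                 c += 1
--
--     if c > 0:
--         return False
--     else:
--         return True
-- ===== SOURCE B (Python) =====
-- def if_linkage_snp_1_2(snp_pos1_cover_reads_dic, snp_pos1_support_reads_dic, snp_pos2_cover_reads_dic, snp_pos2_support_reads_dic):
--     found = False
--     for read in snp_pos1_cover_reads_dic:
--         if read in snp_pos2_cover_reads_dic:
--             if (read in snp_pos1_support_reads_dic) != (read in snp_pos2_support_reads_dic):
--                 return False
--             found = True
--     return found
-- ===== Notes on version B (the rewrite author's own statement) =====
-- stated objective: simpler
-- what changed: Single fused pass over the first cover dict with an early 'return False' at the first shared read whose support memberships disagree and a boolean 'found' flag, instead of A's two staged passes that first materialise an intermediate dict of shared reads and then count disagreements with an integer counter.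
import Mathlib
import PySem

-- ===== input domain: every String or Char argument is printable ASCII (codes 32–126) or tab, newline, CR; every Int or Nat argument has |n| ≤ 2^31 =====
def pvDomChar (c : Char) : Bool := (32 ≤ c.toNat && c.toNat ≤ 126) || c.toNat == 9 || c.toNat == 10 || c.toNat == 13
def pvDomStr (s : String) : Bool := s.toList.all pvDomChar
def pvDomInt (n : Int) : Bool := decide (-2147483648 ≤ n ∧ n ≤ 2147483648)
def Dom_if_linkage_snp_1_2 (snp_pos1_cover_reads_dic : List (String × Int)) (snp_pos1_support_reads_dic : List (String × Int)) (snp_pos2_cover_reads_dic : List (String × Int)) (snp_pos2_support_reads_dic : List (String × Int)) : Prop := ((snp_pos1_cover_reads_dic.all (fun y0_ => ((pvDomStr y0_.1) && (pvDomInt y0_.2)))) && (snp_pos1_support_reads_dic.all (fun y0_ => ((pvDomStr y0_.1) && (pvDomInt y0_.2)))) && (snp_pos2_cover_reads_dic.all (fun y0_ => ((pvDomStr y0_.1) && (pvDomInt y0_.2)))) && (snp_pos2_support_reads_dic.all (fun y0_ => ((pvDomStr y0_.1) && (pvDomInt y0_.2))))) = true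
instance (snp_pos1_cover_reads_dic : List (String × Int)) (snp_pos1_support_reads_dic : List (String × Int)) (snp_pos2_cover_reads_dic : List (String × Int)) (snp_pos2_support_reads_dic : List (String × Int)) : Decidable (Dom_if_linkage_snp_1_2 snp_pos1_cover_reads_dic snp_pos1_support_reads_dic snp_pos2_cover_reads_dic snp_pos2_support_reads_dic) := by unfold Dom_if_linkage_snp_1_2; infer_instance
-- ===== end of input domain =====

-- B fuses A's two staged passes (build intermediate dict, then count disagreements) into one pass with an early exit and a boolean flag (simpler; same cost).


-- ===== PORT A =====
-- dict iteration = its distinct keys in first-insertion order (PySem.List.dedup of the key list);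
-- 'read in dict' = key membership.
def if_linkage_snp_1_2 (snp_pos1_cover_reads_dic : List (String × Int)) (snp_pos1_support_reads_dic : List (String × Int)) (snp_pos2_cover_reads_dic : List (String × Int)) (snp_pos2_support_reads_dic : List (String × Int)) : Bool :=
  let c : Int := 0
  let cover_reads_dic : PySem.Dict String Int :=
    (PySem.List.dedup (snp_pos1_cover_reads_dic.map (·.1))).foldl
      (fun cd read1 =>
        if (snp_pos2_cover_reads_dic.map (·.1)).contains read1 then cd.insert read1 1 else cd)
      PySem.Dict.empty
  let c : Int :=
    if cover_reads_dic.size = 0 then c + 1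
    else cover_reads_dic.keys.foldl
      (fun c read2 =>
        if ((snp_pos1_support_reads_dic.map (·.1)).contains read2
              && !((snp_pos2_support_reads_dic.map (·.1)).contains read2))
            || (!((snp_pos1_support_reads_dic.map (·.1)).contains read2)
              && (snp_pos2_support_reads_dic.map (·.1)).contains read2)
        then c + 1 else c) c
  if c > 0 then false else true

-- ===== PORT B =====
-- B's single fused loop with early exit: recursion over the (distinct, first-insertion-order)
-- keys of the first cover dict; the first disagreeing shared read returns false at once.
def pvAltLoop (c2k s1k s2k : List String) (found : Bool) : List String → Bool
  | [] => found
  | read :: rest =>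
    if c2k.contains read then
      if (s1k.contains read) != (s2k.contains read) then false
      else pvAltLoop c2k s1k s2k true rest
    else pvAltLoop c2k s1k s2k found rest

def if_linkage_snp_1_2_alt (snp_pos1_cover_reads_dic : List (String × Int)) (snp_pos1_support_reads_dic : List (String × Int)) (snp_pos2_cover_reads_dic : List (String × Int)) (snp_pos2_support_reads_dic : List (String × Int)) : Bool :=
  pvAltLoop (snp_pos2_cover_reads_dic.map (·.1))
    (snp_pos1_support_reads_dic.map (·.1))
    (snp_pos2_support_reads_dic.map (·.1))
    false
    (PySem.List.dedup (snp_pos1_cover_reads_dic.map (·.1)))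

-- ===== PRECONDITION & SPEC =====
def Spec_if_linkage_snp_1_2 (snp_pos1_cover_reads_dic : List (String × Int)) (snp_pos1_support_reads_dic : List (String × Int)) (snp_pos2_cover_reads_dic : List (String × Int)) (snp_pos2_support_reads_dic : List (String × Int)) (out : Bool) : Prop := out = if_linkage_snp_1_2_alt snp_pos1_cover_reads_dic snp_pos1_support_reads_dic snp_pos2_cover_reads_dic snp_pos2_support_reads_dic
instance (snp_pos1_cover_reads_dic : List (String × Int)) (snp_pos1_support_reads_dic : List (String × Int)) (snp_pos2_cover_reads_dic : List (String × Int)) (snp_pos2_support_reads_dic : List (String × Int)) (out : Bool) : Decidable (Spec_if_linkage_snp_1_2 snp_pos1_cover_reads_dic snp_pos1_support_reads_dic snp_pos2_cover_reads_dic snp_pos2_support_reads_dic out) := by unfold Spec_if_linkage_snp_1_2; infer_instance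

-- ===== CLAIM (what is proved, stated in full; the proofs are below) =====
def Claim_equal_if_linkage_snp_1_2 : Prop := ∀ (snp_pos1_cover_reads_dic : List (String × Int)) (snp_pos1_support_reads_dic : List (String × Int)) (snp_pos2_cover_reads_dic : List (String × Int)) (snp_pos2_support_reads_dic : List (String × Int)), Dom_if_linkage_snp_1_2 snp_pos1_cover_reads_dic snp_pos1_support_reads_dic snp_pos2_cover_reads_dic snp_pos2_support_reads_dic → Spec_if_linkage_snp_1_2 snp_pos1_cover_reads_dic snp_pos1_support_reads_dic snp_pos2_cover_reads_dic snp_pos2_support_reads_dic (if_linkage_snp_1_2 snp_pos1_cover_reads_dic snp_pos1_support_reads_dic snp_pos2_cover_reads_dic snp_pos2_support_reads_dic)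

-- ===== LEMMAS AND PROOFS =====

-- the conditional counting loop of A counts the elements that satisfy the predicate
theorem pv_foldl_count {α : Type} (q : α → Bool) (l : List α) (c0 : Int) :
    l.foldl (fun c x => if q x then c + 1 else c) c0 = c0 + ((l.filter q).length : Int) := by
  induction l generalizing c0 with
  | nil => simp
  | cons x xs ih =>
    by_cases h : q x = true
    · simp [h, ih]; omega
    · simp [h, ih]

-- A's result characterised as a proposition about memberships
theorem pv_A_iff (l1c l1s l2c l2s : List (String × Int)) :
    if_linkage_snp_1_2 l1c l1s l2c l2s = true ↔
      ((∃ x, x ∈ l1c.map (·.1) ∧ x ∈ l2c.map (·.1)) ∧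
        ∀ x, x ∈ l1c.map (·.1) → x ∈ l2c.map (·.1) →
          (x ∈ l1s.map (·.1) ↔ x ∈ l2s.map (·.1))) := by
  unfold if_linkage_snp_1_2
  dsimp only
  rw [← List.foldl_filter]
  rw [show (fun (cd : PySem.Dict String Int) read1 => cd.insert read1 1)
      = (fun (cd : PySem.Dict String Int) read1 => cd.insert read1 ((fun _ _ => (1:Int)) cd read1)) from rfl]
  have hsize : ∀ (d : PySem.Dict String Int), d.size = d.keys.length := by
    intro d; simp [PySem.Dict.size, PySem.Dict.keys]
  rw [hsize, PySem.Dict.keys_foldl_insert]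
  have hL : PySem.Set.update (PySem.Dict.empty : PySem.Dict String Int).keys
      (List.filter (List.map (fun x => x.1) l2c).contains (PySem.List.dedup (List.map (fun x => x.1) l1c)))
      = List.filter (List.map (fun x => x.1) l2c).contains (PySem.List.dedup (List.map (fun x => x.1) l1c)) := by
    rw [PySem.Dict.keys_empty, PySem.Set.update_nil_left]
    exact PySem.Set.ofList_eq_self_of_nodup _ ((PySem.List.nodup_dedup _).filter _)
  rw [hL]
  set L := List.filter (List.map (fun x => x.1) l2c).contains (PySem.List.dedup (List.map (fun x => x.1) l1c)) with hLdef
  have hmemL : ∀ x, x ∈ L ↔ x ∈ l1c.map (·.1) ∧ x ∈ l2c.map (·.1) := by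
    intro x
    simp [hLdef, List.mem_filter]
  rw [pv_foldl_count]
  by_cases hE : L = []
  · rw [hE]
    simp only [List.length_nil, List.filter_nil, reduceIte]
    rw [if_pos (by norm_num : (0:Int) + 1 > 0)]
    constructor
    · intro h; simp at h
    · intro hP
      exfalso
      obtain ⟨x, hx1, hx2⟩ := hP.1
      have : x ∈ L := (hmemL x).mpr ⟨hx1, hx2⟩
      rw [hE] at this
      simp at this
  · have hlen : L.length ≠ 0 := by simpa [List.length_eq_zero_iff] using hE
    rw [if_neg hlen]
    split_ifs with hc
    · simp only [false_iff]
      intro hP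
      have hfne : L.filter (fun read2 =>
        ((l1s.map (·.1)).contains read2 && !((l2s.map (·.1)).contains read2))
          || (!((l1s.map (·.1)).contains read2) && (l2s.map (·.1)).contains read2)) ≠ [] := by
        intro hnil
        rw [hnil] at hc
        simp at hc
      obtain ⟨x, hxF⟩ := List.exists_mem_of_ne_nil _ hfne
      have hxL := (List.mem_filter.mp hxF).1
      have hxq := (List.mem_filter.mp hxF).2
      obtain ⟨hx1, hx2⟩ := (hmemL x).mp hxL
      have := hP.2 x hx1 hx2
      by_cases h1 : x ∈ l1s.map (·.1) <;> by_cases h2 : x ∈ l2s.map (·.1)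
      · simp [h1, h2] at hxq
      · exact h2 (this.mp h1)
      · exact h1 (this.mpr h2)
      · simp [h1, h2] at hxq
    · simp only [true_iff]
      have hfnil : L.filter (fun read2 =>
        ((l1s.map (·.1)).contains read2 && !((l2s.map (·.1)).contains read2))
          || (!((l1s.map (·.1)).contains read2) && (l2s.map (·.1)).contains read2)) = [] := by
        have h0 : (L.filter (fun read2 =>
        ((l1s.map (·.1)).contains read2 && !((l2s.map (·.1)).contains read2))
          || (!((l1s.map (·.1)).contains read2) && (l2s.map (·.1)).contains read2))).length = 0 := by
          have := hc
          omega
        exact List.length_eq_zero_iff.mp h0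
      refine ⟨?_, ?_⟩
      · obtain ⟨x, hx⟩ := List.exists_mem_of_ne_nil L hE
        exact ⟨x, (hmemL x).mp hx⟩
      · intro x hx1 hx2
        have hxL : x ∈ L := (hmemL x).mpr ⟨hx1, hx2⟩
        have := List.filter_eq_nil_iff.mp hfnil x hxL
        by_cases h1 : x ∈ l1s.map (·.1) <;> by_cases h2 : x ∈ l2s.map (·.1)
        · simp [h1, h2]
        · simp [h1, h2] at this
        · simp [h1, h2] at this
        · simp [h1, h2]

-- invariant of B's fused loop
theorem pv_altLoop_iff (c2k s1k s2k : List String) (found : Bool) (L : List String) :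
    pvAltLoop c2k s1k s2k found L = true ↔
      ((∀ x ∈ L, x ∈ c2k → (x ∈ s1k ↔ x ∈ s2k)) ∧
        (found = true ∨ ∃ x ∈ L, x ∈ c2k)) := by
  induction L generalizing found with
  | nil => simp [pvAltLoop]
  | cons r rest ih =>
    simp only [pvAltLoop]
    by_cases hc : r ∈ c2k
    · rw [if_pos (by simpa using hc)]
      by_cases hd : s1k.contains r = s2k.contains r
      · rw [if_neg (by rw [hd]; simp), ih]
        have hag : (r ∈ s1k ↔ r ∈ s2k) := by
          rw [Bool.eq_iff_iff] at hd; simpa using hd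
        constructor
        · rintro ⟨hall, _⟩
          refine ⟨?_, Or.inr ⟨r, by simp, hc⟩⟩
          intro x hx hxc
          rcases List.mem_cons.mp hx with h | h
          · subst h; exact hag
          · exact hall x h hxc
        · rintro ⟨hall, _⟩
          exact ⟨fun x hx hxc => hall x (List.mem_cons_of_mem _ hx) hxc, Or.inl rfl⟩
      · rw [if_pos (bne_iff_ne.mpr hd)]
        simp only [Bool.false_eq_true, false_iff]
        rintro ⟨hall, _⟩
        have := hall r (by simp) hc
        apply hd
        rw [Bool.eq_iff_iff]
        simpa using this
    · rw [if_neg (by simpa using hc), ih]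
      constructor
      · rintro ⟨hall, hor⟩
        refine ⟨?_, ?_⟩
        · intro x hx hxc
          rcases List.mem_cons.mp hx with h | h
          · subst h; exact absurd hxc hc
          · exact hall x h hxc
        · rcases hor with h | ⟨x, hx, hxc⟩
          · exact Or.inl h
          · exact Or.inr ⟨x, List.mem_cons_of_mem _ hx, hxc⟩
      · rintro ⟨hall, hor⟩
        refine ⟨fun x hx hxc => hall x (List.mem_cons_of_mem _ hx) hxc, ?_⟩
        rcases hor with h | ⟨x, hx, hxc⟩
        · exact Or.inl h
        · rcases List.mem_cons.mp hx with h | h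
          · subst h; exact absurd hxc hc
          · exact Or.inr ⟨x, h, hxc⟩

-- B's result characterised as the same proposition as A's
theorem pv_B_iff (l1c l1s l2c l2s : List (String × Int)) :
    if_linkage_snp_1_2_alt l1c l1s l2c l2s = true ↔
      ((∃ x, x ∈ l1c.map (·.1) ∧ x ∈ l2c.map (·.1)) ∧
        ∀ x, x ∈ l1c.map (·.1) → x ∈ l2c.map (·.1) →
          (x ∈ l1s.map (·.1) ↔ x ∈ l2s.map (·.1))) := by
  unfold if_linkage_snp_1_2_alt
  rw [pv_altLoop_iff]
  have hd : ∀ x, x ∈ PySem.List.dedup (l1c.map (·.1)) ↔ x ∈ l1c.map (·.1) := by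
    intro x; simp
  constructor
  · rintro ⟨hall, hor⟩
    rcases hor with h | ⟨x, hx, hxc⟩
    · simp at h
    · exact ⟨⟨x, (hd x).mp hx, hxc⟩, fun x hx1 hx2 => hall x ((hd x).mpr hx1) hx2⟩
  · rintro ⟨⟨x, hx1, hx2⟩, hall⟩
    exact ⟨fun x hx hxc => hall x ((hd x).mp hx) hxc, Or.inr ⟨x, (hd x).mpr hx1, hx2⟩⟩

-- ===== VERDICT (by name: the statement is the Claim_ definition above) =====
theorem if_linkage_snp_1_2_spec : Claim_equal_if_linkage_snp_1_2 := by
  intro l1c l1s l2c l2s _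
  unfold Spec_if_linkage_snp_1_2
  rw [Bool.eq_iff_iff, pv_A_iff, pv_B_iff]
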